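-- pv_equiv track=rewrite | github.com/poymanov/python-algorithms | 17/Heap.py | get_array_size
-- ===== SOURCE A (Python) =====
-- def get_array_size(depth):
-- 	childs = None
-- 	array_size = 0
--
-- 	for i in range(depth):
-- 		if childs == None:
-- 			childs = 1
-- 		else:
-- 			childs *=2
--
-- 		array_size += childs
--
-- 	return array_size
-- ===== SOURCE B (Python) =====
-- def get_array_size(depth):
-- 	if depth <= 0:
-- 		return 0
-- 	return 2 ** depth - 1
-- ===== Notes on version B (the rewrite author's own statement) =====
-- stated objective: faster
-- what changed: Replaced the per-level accumulation loop by the closed form 2**depth - 1 (sum of a geometric series), with 0 for non-positive depth.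
import Mathlib
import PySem

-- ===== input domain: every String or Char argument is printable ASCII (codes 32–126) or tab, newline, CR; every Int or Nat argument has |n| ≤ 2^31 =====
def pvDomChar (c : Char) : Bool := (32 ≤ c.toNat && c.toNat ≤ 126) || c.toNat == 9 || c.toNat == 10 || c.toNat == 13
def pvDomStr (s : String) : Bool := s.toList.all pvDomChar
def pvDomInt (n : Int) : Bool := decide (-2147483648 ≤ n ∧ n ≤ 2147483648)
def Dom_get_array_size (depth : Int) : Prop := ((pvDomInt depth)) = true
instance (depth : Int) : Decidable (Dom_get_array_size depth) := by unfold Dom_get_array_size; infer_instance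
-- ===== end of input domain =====

-- B replaces A's per-level loop by the closed form 2^depth - 1 (0 for depth ≤ 0); return values are proved equal.

-- ===== PORT A =====
-- literal transliteration: loop over range(depth) with state (childs : Option Int, array_size)
def get_array_size (depth : Int) : Int :=
  ((PySem.List.pyRange 0 depth 1).foldl
    (fun (st : Option Int × Int) _ =>
      let childs : Int := match st.1 with
        | none => 1
        | some c => c * 2
      (some childs, st.2 + childs))
    (none, 0)).2

-- ===== PORT B =====
def get_array_size_alt (depth : Int) : Int :=
  if depth ≤ 0 then 0 else 2 ^ depth.toNat - 1

-- ===== PRECONDITION & SPEC =====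
def Spec_get_array_size (depth : Int) (out : Int) : Prop := out = get_array_size_alt depth
instance (depth : Int) (out : Int) : Decidable (Spec_get_array_size depth out) := by unfold Spec_get_array_size; infer_instance

-- ===== CLAIM (what is proved, stated in full; the proofs are below) =====
def Claim_equal_get_array_size : Prop := ∀ (depth : Int), Dom_get_array_size depth → Spec_get_array_size depth (get_array_size depth)

-- ===== LEMMAS AND PROOFS =====

-- A's loop body, named for the lemmas
def pvStep (st : Option Int × Int) (_ : Int) : Option Int × Int :=
  let childs : Int := match st.1 with
    | none => 1
    | some c => c * 2
  (some childs, st.2 + childs)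

-- invariant: once childs is set to c, k further iterations double it k times and add 2c(2^k - 1)
theorem pvStep_foldl_some (l : List Int) : ∀ (c s : Int),
    l.foldl pvStep (some c, s) = (some (c * 2 ^ l.length), s + 2 * c * (2 ^ l.length - 1)) := by
  induction l with
  | nil => intro c s; simp
  | cons x xs ih =>
    intro c s
    simp only [List.foldl_cons, pvStep, List.length_cons]
    rw [ih (c * 2) (s + c * 2), Prod.mk.injEq]
    refine ⟨by rw [Option.some_inj]; ring, by ring⟩

theorem get_array_size_eq_foldl (depth : Int) :
    get_array_size depth = ((PySem.List.pyRange 0 depth 1).foldl pvStep (none, 0)).2 := rfl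

-- ===== VERDICT (by name: the statement is the Claim_ definition above) =====
theorem get_array_size_spec : Claim_equal_get_array_size := by
  intro depth _
  unfold Spec_get_array_size get_array_size_alt
  rw [get_array_size_eq_foldl]
  by_cases h : depth ≤ 0
  · rw [PySem.List.pyRange_one_eq_nil (by omega)]
    simp [h]
  · push Not at h
    rw [PySem.List.pyRange_one_cons (by omega)]
    simp only [List.foldl_cons, pvStep]
    rw [pvStep_foldl_some]
    simp only [zero_add]
    have hlen : (PySem.List.pyRange 1 depth 1).length = (depth - 1).toNat :=
      PySem.List.length_pyRange_one 1 depth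
    have hdt : depth.toNat = (depth - 1).toNat + 1 := by omega
    rw [hlen, if_neg (by omega : ¬ depth ≤ 0), hdt]
    ring
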